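-- pv_equiv track=rewrite | github.com/WonHwang/1D1P_2 | P86491.py | solution
-- ===== SOURCE A (Python) =====
-- def solution(sizes):
--     answer = 0
--     w, h = 0, 0
--     for size in sizes:
--         w_, h_ = size[0], size[1]
--         if h_ > w_:
--             w_, h_ = h_, w_
--         if w_ > w:
--             w = w_
--         if h_ > h:
--             h = h_
--     answer = w*h
--     return answer
-- ===== SOURCE B (Python) =====
-- def solution(sizes):
--     # Each card demands a wallet of (short, long) = (min, max) of its sides;
--     # demands merge componentwise (a commutative monoid with identity (0, 0)).
--     # Reduce the demands by divide and conquer instead of a mutable loop.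
--     def merge(p, q):
--         return (max(p[0], q[0]), max(p[1], q[1]))
--
--     def rec(lst):
--         if len(lst) == 1:
--             a, b = lst[0][0], lst[0][1]
--             return (a, b) if a <= b else (b, a)
--         m = len(lst) // 2
--         return merge(rec(lst[:m]), rec(lst[m:]))
--
--     if not sizes:
--         return 0
--     h, w = merge((0, 0), rec(sizes))
--     return w * h
-- ===== Notes on version B (the rewrite author's own statement) =====
-- stated objective: alternative
-- what changed: Replaces A's single forward loop with mutable swap-and-update state (w,h) by a divide-and-conquer reduction: each card is mapped to its (min,max) demand and the demands are merged componentwise (a commutative monoid with identity (0,0)) over recursively halved sublists.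
import Mathlib
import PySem

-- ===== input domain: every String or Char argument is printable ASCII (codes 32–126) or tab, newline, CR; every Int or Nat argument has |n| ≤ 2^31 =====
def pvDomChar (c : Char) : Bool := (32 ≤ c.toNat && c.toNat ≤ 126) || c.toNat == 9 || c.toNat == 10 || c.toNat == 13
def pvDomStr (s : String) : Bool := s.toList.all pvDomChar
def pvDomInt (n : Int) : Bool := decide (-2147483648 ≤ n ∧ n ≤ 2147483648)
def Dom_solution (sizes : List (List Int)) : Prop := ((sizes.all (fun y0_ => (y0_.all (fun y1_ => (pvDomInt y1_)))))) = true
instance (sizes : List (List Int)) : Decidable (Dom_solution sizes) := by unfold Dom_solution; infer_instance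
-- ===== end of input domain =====

-- B replaces A's linear mutable loop (swap-and-update of running w, h) by a
-- divide-and-conquer reduction of per-card demands under a componentwise-max
-- merge monoid with identity (0, 0); objective: alternative.

-- ===== PORT A =====
-- loop body of A: normalize (swap so w_ ≥ h_), then conditionally update w and h
def solStep (p : Int × Int) (size : List Int) : Int × Int :=
  let w0 := (PySem.List.pyGet? size 0).getD 0
  let h0 := (PySem.List.pyGet? size 1).getD 0
  let wh := if h0 > w0 then (h0, w0) else (w0, h0)
  let w := if wh.1 > p.1 then wh.1 else p.1
  let h := if wh.2 > p.2 then wh.2 else p.2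
  (w, h)

def solution (sizes : List (List Int)) : Int :=
  let p := sizes.foldl solStep (0, 0)
  p.1 * p.2

-- ===== PORT B =====
-- merge(p, q): componentwise max of two (short, long) demands
def bMerge (p q : Int × Int) : Int × Int := (max p.1 q.1, max p.2 q.2)

-- rec(lst): divide-and-conquer reduction; Python never calls rec on an empty
-- list, so the [] arm is only a totalization guard.
def bRec (l : List (List Int)) : Int × Int :=
  if _h1 : l.length ≤ 1 then
    match l with
    | [] => (0, 0)
    | s :: _ =>
      let a := (PySem.List.pyGet? s 0).getD 0
      let b := (PySem.List.pyGet? s 1).getD 0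
      if a ≤ b then (a, b) else (b, a)
  else
    let m := l.length / 2
    bMerge (bRec (l.take m)) (bRec (l.drop m))
termination_by l.length
decreasing_by
  · simp only [List.length_take]; omega
  · simp only [List.length_drop]; omega

def solution_alt (sizes : List (List Int)) : Int :=
  if sizes.isEmpty then 0
  else
    let p := bMerge (0, 0) (bRec sizes)
    p.2 * p.1

-- ===== PRECONDITION & SPEC =====
-- A indexes size[0] and size[1]; it raises IndexError on any inner list shorter than 2.
def Pre_solution (sizes : List (List Int)) : Prop := ∀ s ∈ sizes, 2 ≤ s.length
instance (sizes : List (List Int)) : Decidable (Pre_solution sizes) := by unfold Pre_solution; infer_instance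
def pvWitness_solution : List (List Int) := [[3, 1], [2, 5]]
def Spec_solution (sizes : List (List Int)) (out : Int) : Prop := out = solution_alt sizes
instance (sizes : List (List Int)) (out : Int) : Decidable (Spec_solution sizes out) := by unfold Spec_solution; infer_instance

-- ===== CLAIM (what is proved, stated in full; the proofs are below) =====
def Claim_equal_solution : Prop := ∀ (sizes : List (List Int)), Dom_solution sizes → Pre_solution sizes → Spec_solution sizes (solution sizes)

-- ===== LEMMAS AND PROOFS =====
theorem solStep_eq (p : Int × Int) (s : List Int) :
    solStep p s = (max p.1 (max ((PySem.List.pyGet? s 0).getD 0) ((PySem.List.pyGet? s 1).getD 0)),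
                   max p.2 (min ((PySem.List.pyGet? s 0).getD 0) ((PySem.List.pyGet? s 1).getD 0))) := by
  unfold solStep
  obtain ⟨a, b⟩ := p
  generalize (PySem.List.pyGet? s 0).getD 0 = x
  generalize (PySem.List.pyGet? s 1).getD 0 = y
  by_cases h : y > x <;>
    simp only [h, if_true, if_false, Prod.ext_iff, max_def, min_def] <;>
    split_ifs <;> simp_all <;> omega

theorem bMerge_assoc (p q r : Int × Int) :
    bMerge p (bMerge q r) = bMerge (bMerge p q) r := by
  simp [bMerge, max_assoc]

-- the divide-and-conquer reduction, merged with a seed, equals A's left fold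
theorem bRec_fold (n : Nat) : ∀ (l : List (List Int)), l.length = n → l ≠ [] →
    ∀ w h : Int, bMerge (h, w) (bRec l) = Prod.swap (l.foldl solStep (w, h)) := by
  induction n using Nat.strong_induction_on with
  | _ n ih =>
    intro l hlen hne w h
    rw [bRec]
    by_cases h1 : l.length ≤ 1
    · rw [dif_pos h1]
      match l, hne with
      | s :: t, _ =>
        have ht : t = [] := by
          simp only [List.length_cons] at h1
          exact List.eq_nil_of_length_eq_zero (by omega)
        subst ht
        simp only [List.foldl_cons, List.foldl_nil, solStep_eq]
        generalize (PySem.List.pyGet? s 0).getD 0 = a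
        generalize (PySem.List.pyGet? s 1).getD 0 = b
        by_cases hab : a ≤ b <;>
          simp only [hab, if_true, if_false, bMerge, Prod.swap,
            max_def, min_def]
    · rw [dif_neg h1]
      have h2 : 2 ≤ l.length := by omega
      have e : l.take (l.length / 2) ++ l.drop (l.length / 2) = l := List.take_append_drop _ _
      have lt1 : (l.take (l.length / 2)).length < n := by
        simp only [List.length_take]; omega
      have lt2 : (l.drop (l.length / 2)).length < n := by
        simp only [List.length_drop]; omega
      have ne1 : l.take (l.length / 2) ≠ [] := by
        intro hc
        have := congrArg List.length hc
        simp only [List.length_take, List.length_nil] at this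
        omega
      have ne2 : l.drop (l.length / 2) ≠ [] := by
        intro hc
        have := congrArg List.length hc
        simp only [List.length_drop, List.length_nil] at this
        omega
      conv_rhs => rw [← e]
      rw [List.foldl_append]
      rw [bMerge_assoc]
      rw [ih _ lt1 _ rfl ne1 w h]
      set p1 := (l.take (l.length / 2)).foldl solStep (w, h) with hp1
      have : Prod.swap p1 = (p1.2, p1.1) := rfl
      rw [this, ih _ lt2 _ rfl ne2 p1.1 p1.2]

-- ===== VERDICT (by name: the statement is the Claim_ definition above) =====
theorem solution_spec : Claim_equal_solution := by
  intro sizes _ _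
  unfold Spec_solution solution solution_alt
  cases sizes with
  | nil => rfl
  | cons s t =>
    simp only [List.isEmpty_cons, if_false, Bool.false_eq_true]
    rw [bRec_fold (s :: t).length (s :: t) rfl (by simp) 0 0]
    rfl
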